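-- pv_equiv track=rewrite | github.com/josucueva/kaggle_datasets | dataset_analyzer.py | _matches_hint
-- ===== SOURCE A (Python) =====
-- def _matches_hint(column_name, hints):
--     col = str(column_name).strip().lower().replace(" ", "_")
--     if col in hints:
--         return True
--
--     for hint in hints:
--         if len(hint) <= 1:
--             continue
--         if col.startswith(f"{hint}_") or col.endswith(f"_{hint}"):
--             return True
--
--     return False
-- ===== SOURCE B (Python) =====
-- def _matches_hint(column_name, hints):
--     col = str(column_name).strip().lower().replace(" ", "_")
--     if col in hints:
--         return True
--     hint_set = set(hints)
--     n = len(col)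
--     for i, ch in enumerate(col):
--         if ch != '_':
--             continue
--         if i > 1 and col[:i] in hint_set:
--             return True
--         if n - i - 1 > 1 and col[i + 1:] in hint_set:
--             return True
--     return False
-- ===== Notes on version B (the rewrite author's own statement) =====
-- stated objective: alternative
-- what changed: Instead of scanning every hint and testing startswith/endswith, B walks the normalized column once, and at each underscore tests the prefix/suffix candidate (of length > 1) for membership in a set built from the hints.
import Mathlib
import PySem

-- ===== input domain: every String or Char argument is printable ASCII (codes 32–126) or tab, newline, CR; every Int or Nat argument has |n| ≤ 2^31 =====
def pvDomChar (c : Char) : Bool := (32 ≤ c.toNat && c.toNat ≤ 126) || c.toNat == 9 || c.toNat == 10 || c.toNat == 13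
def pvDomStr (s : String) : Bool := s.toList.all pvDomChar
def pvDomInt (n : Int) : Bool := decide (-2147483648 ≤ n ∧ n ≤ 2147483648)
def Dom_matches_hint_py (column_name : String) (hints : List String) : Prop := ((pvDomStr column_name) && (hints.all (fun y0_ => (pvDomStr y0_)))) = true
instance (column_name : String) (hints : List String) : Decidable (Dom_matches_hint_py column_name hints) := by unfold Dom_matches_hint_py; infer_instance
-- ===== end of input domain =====

-- ===== PORT A =====
-- B performs the same normalization but walks the column's underscore positions,
-- testing prefix/suffix candidates against a set of the hints (objective: alternative decomposition).

-- the for-loop over hints in A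
def matchesHintLoopA (col : String) : List String → Bool
  | [] => false
  | hint :: rest =>
    if PySem.Str.len hint ≤ 1 then matchesHintLoopA col rest
    else if PySem.Str.startswith col (hint ++ "_") || PySem.Str.endswith col ("_" ++ hint) then
      true
    else matchesHintLoopA col rest

def matches_hint_py (column_name : String) (hints : List String) : Bool :=
  let col := PySem.Str.replace (PySem.Str.lower (PySem.Str.strip column_name)) " " "_"
  if hints.contains col then true
  else matchesHintLoopA col hints

-- ===== PORT B =====
-- the for-loop over enumerate(col) in B
def matchesHintLoopB (hintSet : PySem.Set String) (cs : List Char) (n : Nat) :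
    List (Int × Char) → Bool
  | [] => false
  | (i, ch) :: rest =>
    if ch ≠ '_' then matchesHintLoopB hintSet cs n rest
    else if 1 < i ∧ hintSet.contains (String.ofList (PySem.List.slice cs none (some i))) then
      true
    else if 1 < (n : Int) - i - 1 ∧
        hintSet.contains (String.ofList (PySem.List.slice cs (some (i + 1)) none)) then
      true
    else matchesHintLoopB hintSet cs n rest

def matches_hint_py_alt (column_name : String) (hints : List String) : Bool :=
  let col := PySem.Str.replace (PySem.Str.lower (PySem.Str.strip column_name)) " " "_"
  if hints.contains col then true
  else
    let cs := col.toList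
    matchesHintLoopB (PySem.Set.ofList hints) cs cs.length (PySem.List.enumerate cs 0)

-- ===== PRECONDITION & SPEC =====
def Spec_matches_hint_py (column_name : String) (hints : List String) (out : Bool) : Prop := out = matches_hint_py_alt column_name hints
instance (column_name : String) (hints : List String) (out : Bool) : Decidable (Spec_matches_hint_py column_name hints out) := by unfold Spec_matches_hint_py; infer_instance

-- ===== CLAIM (what is proved, stated in full; the proofs are below) =====
def Claim_equal_matches_hint_py : Prop := ∀ (column_name : String) (hints : List String), Dom_matches_hint_py column_name hints → Spec_matches_hint_py column_name hints (matches_hint_py column_name hints)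

-- ===== LEMMAS AND PROOFS =====

-- what A's hint loop decides
def MatchesByHint (cs : List Char) (hints : List String) : Prop :=
  ∃ h ∈ hints, 1 < h.toList.length ∧
    ((h.toList ++ ['_']) <+: cs ∨ ('_' :: h.toList) <:+ cs)

theorem loopA_iff (col : String) (hints : List String) :
    matchesHintLoopA col hints = true ↔ MatchesByHint col.toList hints := by
  induction hints with
  | nil => simp [matchesHintLoopA, MatchesByHint]
  | cons h rest ih =>
    simp only [matchesHintLoopA]
    have hlen : PySem.Str.len h = (h.toList.length : Int) := by
      simp [PySem.Str.len]
    by_cases h1 : PySem.Str.len h ≤ 1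
    · rw [if_pos h1, ih]
      constructor
      · rintro ⟨g, hg, hgl, hgp⟩; exact ⟨g, List.mem_cons_of_mem _ hg, hgl, hgp⟩
      · rintro ⟨g, hg, hgl, hgp⟩
        rcases List.mem_cons.mp hg with rfl | hg'
        · exfalso; rw [hlen] at h1; omega
        · exact ⟨g, hg', hgl, hgp⟩
    · rw [if_neg h1]
      by_cases h2 : (PySem.Str.startswith col (h ++ "_") || PySem.Str.endswith col ("_" ++ h)) = true
      · rw [if_pos h2]
        simp only [Bool.or_eq_true, PySem.Str.startswith_eq, PySem.Str.endswith_eq,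
          PySem.Chars.startswith_iff, PySem.Chars.endswith_iff, String.toList_append] at h2
        have h2' : (h.toList ++ ['_']) <+: col.toList ∨ ('_' :: h.toList) <:+ col.toList := by
          simpa using h2
        simp only [true_iff]
        exact ⟨h, List.mem_cons_self, by rw [hlen] at h1; omega, h2'⟩
      · rw [if_neg h2, ih]
        simp only [Bool.or_eq_true, PySem.Str.startswith_eq, PySem.Str.endswith_eq,
          PySem.Chars.startswith_iff, PySem.Chars.endswith_iff, String.toList_append] at h2
        constructor
        · rintro ⟨g, hg, hgl, hgp⟩; exact ⟨g, List.mem_cons_of_mem _ hg, hgl, hgp⟩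
        · rintro ⟨g, hg, hgl, hgp⟩
          rcases List.mem_cons.mp hg with rfl | hg'
          · exfalso; apply h2; simpa using hgp
          · exact ⟨g, hg', hgl, hgp⟩

theorem loopB_iff (hintSet : PySem.Set String) (cs : List Char) (n : Nat)
    (l : List (Int × Char)) :
    matchesHintLoopB hintSet cs n l = true ↔
      ∃ p ∈ l, p.2 = '_' ∧
        ((1 < p.1 ∧ hintSet.contains (String.ofList (PySem.List.slice cs none (some p.1))) = true) ∨
         (1 < (n : Int) - p.1 - 1 ∧
          hintSet.contains (String.ofList (PySem.List.slice cs (some (p.1 + 1)) none)) = true)) := by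
  induction l with
  | nil => simp [matchesHintLoopB]
  | cons p rest ih =>
    obtain ⟨i, ch⟩ := p
    simp only [matchesHintLoopB]
    by_cases hch : ch ≠ '_'
    · rw [if_pos hch, ih]
      constructor
      · rintro ⟨q, hq, hqr⟩; exact ⟨q, List.mem_cons_of_mem _ hq, hqr⟩
      · rintro ⟨q, hq, hq2, hqr⟩
        rcases List.mem_cons.mp hq with rfl | hq'
        · exact absurd hq2 hch
        · exact ⟨q, hq', hq2, hqr⟩
    · rw [if_neg hch]
      rw [not_not] at hch
      by_cases hc1 : 1 < i ∧ hintSet.contains (String.ofList (PySem.List.slice cs none (some i))) = true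
      · rw [if_pos hc1]; simp only [true_iff]
        exact ⟨(i, ch), List.mem_cons_self, hch, Or.inl hc1⟩
      · rw [if_neg hc1]
        by_cases hc2 : 1 < (n : Int) - i - 1 ∧
            hintSet.contains (String.ofList (PySem.List.slice cs (some (i + 1)) none)) = true
        · rw [if_pos hc2]; simp only [true_iff]
          exact ⟨(i, ch), List.mem_cons_self, hch, Or.inr hc2⟩
        · rw [if_neg hc2, ih]
          constructor
          · rintro ⟨q, hq, hqr⟩; exact ⟨q, List.mem_cons_of_mem _ hq, hqr⟩
          · rintro ⟨q, hq, hq2, hqr⟩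
            rcases List.mem_cons.mp hq with rfl | hq'
            · rcases hqr with hc | hc
              · exact absurd hc hc1
              · exact absurd hc hc2
            · exact ⟨q, hq', hq2, hqr⟩

theorem bridge (cs : List Char) (hints : List String) :
    (∃ p ∈ PySem.List.enumerate cs 0, p.2 = '_' ∧
        ((1 < p.1 ∧ (PySem.Set.ofList hints).contains
            (String.ofList (PySem.List.slice cs none (some p.1))) = true) ∨
         (1 < (cs.length : Int) - p.1 - 1 ∧ (PySem.Set.ofList hints).contains
            (String.ofList (PySem.List.slice cs (some (p.1 + 1)) none)) = true))) ↔
      MatchesByHint cs hints := by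
  constructor
  · rintro ⟨p, hp, hpu, hpc⟩
    rw [PySem.List.mem_enumerate_iff] at hp
    obtain ⟨k, hk, rfl⟩ := hp
    simp only [zero_add] at hpu hpc ⊢
    have hcs : cs = cs.take k ++ '_' :: cs.drop (k + 1) := by
      conv_lhs => rw [← List.take_append_drop k cs]
      rw [List.drop_eq_getElem_cons hk, hpu]
    rcases hpc with ⟨hki, hmem⟩ | ⟨hki, hmem⟩
    · rw [PySem.List.slice_to_natCast, PySem.Set.contains_iff, PySem.Set.mem_ofList] at hmem
      refine ⟨String.ofList (cs.take k), hmem, ?_, Or.inl ?_⟩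
      · simp only [String.toList_ofList, List.length_take]
        omega
      · simp only [String.toList_ofList]
        exact ⟨cs.drop (k + 1), by rw [List.append_assoc]; simpa using hcs.symm⟩
    · have hcast : (k : Int) + 1 = ((k + 1 : Nat) : Int) := by push_cast; ring
      rw [hcast, PySem.List.slice_from_natCast, PySem.Set.contains_iff,
        PySem.Set.mem_ofList] at hmem
      refine ⟨String.ofList (cs.drop (k + 1)), hmem, ?_, Or.inr ?_⟩
      · simp only [String.toList_ofList, List.length_drop]
        omega
      · simp only [String.toList_ofList]
        exact ⟨cs.take k, hcs.symm⟩
  · rintro ⟨h, hh, hhl, hhp | hhs⟩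
    · obtain ⟨t, ht⟩ := hhp
      set k := h.toList.length with hkdef
      have hcs : cs = h.toList ++ '_' :: t := by rw [← ht]; simp
      have hklt : k < cs.length := by rw [hcs]; simp [hkdef]
      have hpmem : (((k : Int)), cs[k]) ∈ PySem.List.enumerate cs 0 := by
        rw [PySem.List.mem_enumerate_iff]; exact ⟨k, hklt, by simp⟩
      have hu : cs[k] = '_' := by
        have h9 : cs[k]? = some '_' := by
          rw [hcs, List.getElem?_append_right (by omega)]
          simp [hkdef]
        rwa [List.getElem?_eq_getElem hklt, Option.some_inj] at h9
      have h1k : (1 : Int) < (k : Int) := by exact_mod_cast hhl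
      have hcont : (PySem.Set.ofList hints).contains
          (String.ofList (PySem.List.slice cs none (some ((k : Int))))) = true := by
        rw [PySem.List.slice_to_natCast, PySem.Set.contains_iff, PySem.Set.mem_ofList]
        have htake : cs.take k = h.toList := by rw [hcs, hkdef, List.take_left]
        rw [htake]; simpa using hh
      exact ⟨(((k : Int)), cs[k]), hpmem, hu, Or.inl ⟨h1k, hcont⟩⟩
    · obtain ⟨s, hs⟩ := hhs
      set k := s.length with hkdef
      have hcs : cs = (s ++ ['_']) ++ h.toList := by rw [← hs]; simp
      have hlen : cs.length = k + 1 + h.toList.length := by rw [hcs]; simp [hkdef]; omega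
      have hklt : k < cs.length := by omega
      have hpmem : (((k : Int)), cs[k]) ∈ PySem.List.enumerate cs 0 := by
        rw [PySem.List.mem_enumerate_iff]; exact ⟨k, hklt, by simp⟩
      have hu : cs[k] = '_' := by
        have h9 : cs[k]? = some '_' := by
          rw [hcs, List.append_assoc, List.getElem?_append_right (by omega)]
          simp [hkdef]
        rwa [List.getElem?_eq_getElem hklt, Option.some_inj] at h9
      have h1k : (1 : Int) < (cs.length : Int) - (k : Int) - 1 := by omega
      have hcont : (PySem.Set.ofList hints).contains
          (String.ofList (PySem.List.slice cs (some ((k : Int) + 1)) none)) = true := by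
        have hcast : (k : Int) + 1 = (((k + 1 : Nat)) : Int) := by push_cast; ring
        rw [hcast, PySem.List.slice_from_natCast, PySem.Set.contains_iff, PySem.Set.mem_ofList]
        have hlen' : (s ++ ['_']).length = k + 1 := by simp [hkdef]
        have hdrop : cs.drop (k + 1) = h.toList := by rw [hcs, ← hlen', List.drop_left]
        rw [hdrop]; simpa using hh
      exact ⟨(((k : Int)), cs[k]), hpmem, hu, Or.inr ⟨h1k, hcont⟩⟩

-- ===== VERDICT (by name: the statement is the Claim_ definition above) =====
theorem matches_hint_py_spec : Claim_equal_matches_hint_py := by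
  intro column_name hints _
  unfold Spec_matches_hint_py matches_hint_py matches_hint_py_alt
  by_cases hc : hints.contains
      (PySem.Str.replace (PySem.Str.lower (PySem.Str.strip column_name)) " " "_") = true
  · rw [if_pos hc, if_pos hc]
  · rw [if_neg hc, if_neg hc, Bool.eq_iff_iff, loopA_iff, loopB_iff]
    exact (bridge _ hints).symm
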